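-- pv_equiv track=rewrite | github.com/ucam-department-of-psychiatry/camcops | server/database.py | gen_items_from_sql_csv
-- ===== SOURCE A (Python) =====
-- SQLSEP = ","
--
-- SQLQUOTE = "'"
--
-- def gen_items_from_sql_csv(s):
--     """Splits a comma-separated list of quoted SQL values, with ' as the quote
--     character. Allows escaping of the quote character by doubling it. Returns
--     the quotes (and escaped quotes) as part of the result. Allows newlines etc.
--     within the string passed."""
--     # csv.reader will not both process the quotes and return the quotes;
--     # we need them to distinguish e.g. NULL from 'NULL'.
--     if not s:
--         return
--     n = len(s)
--     startpos = 0
--     pos = 0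
--     in_quotes = False
--     while pos < n:
--         if not in_quotes:
--             if s[pos] == SQLSEP:
--                 # end of chunk
--                 chunk = s[startpos:pos]  # does not include s[pos]
--                 yield chunk.strip()
--                 startpos = pos + 1
--             elif s[pos] == SQLQUOTE:
--                 # start of quote
--                 in_quotes = True
--         else:
--             if pos < n - 1 and s[pos] == SQLQUOTE and s[pos + 1] == SQLQUOTE:
--                 # double quote, '', is an escaped quote, not end of quote
--                 pos += 1  # skip one more than we otherwise would
--             elif s[pos] == SQLQUOTE:
--                 # end of quote
--                 in_quotes = False
--         pos += 1
--     # Last chunk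
--     yield s[startpos:].strip()
-- ===== SOURCE B (Python) =====
-- SQLSEP = ","
--
-- SQLQUOTE = "'"
--
--
-- def gen_items_from_sql_csv(s):
--     """Same task, different algorithm: split on every comma first, then merge
--     back the pieces that lie inside quotes.  A comma is a real separator
--     exactly when the number of quote characters before it is even (a doubled
--     quote '' contributes two, leaving the in-quotes state unchanged), so we
--     join consecutive pieces while the pending chunk contains an odd number of
--     quotes."""
--     if not s:
--         return
--     pending = None
--     for piece in s.split(SQLSEP):
--         pending = piece if pending is None else pending + SQLSEP + piece
--         if pending.count(SQLQUOTE) % 2 == 0: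
--             yield pending.strip()
--             pending = None
--     if pending is not None:
--         yield pending.strip()
-- ===== Notes on version B (the rewrite author's own statement) =====
-- stated objective: alternative
-- what changed: A walks the string once with an index-based in-quotes state machine (with an explicit doubled-quote skip); B instead splits the string on every comma up front and then re-joins consecutive pieces while the pending chunk contains an odd number of quote characters, which is exactly when the comma fell inside quotes.
import Mathlib
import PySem

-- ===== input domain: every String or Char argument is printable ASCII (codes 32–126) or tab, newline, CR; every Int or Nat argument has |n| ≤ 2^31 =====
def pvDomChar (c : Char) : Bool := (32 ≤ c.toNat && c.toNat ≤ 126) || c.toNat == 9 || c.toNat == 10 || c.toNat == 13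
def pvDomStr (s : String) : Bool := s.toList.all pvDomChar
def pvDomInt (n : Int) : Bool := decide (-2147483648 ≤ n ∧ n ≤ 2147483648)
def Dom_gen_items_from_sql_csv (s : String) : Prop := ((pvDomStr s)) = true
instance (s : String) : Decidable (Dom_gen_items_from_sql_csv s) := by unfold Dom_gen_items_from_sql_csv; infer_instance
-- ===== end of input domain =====

-- B replaces A's single index-based quote-state machine by "split on every comma,
-- then merge back pieces with an odd number of quote characters" (a comma is a real
-- separator iff the quotes before it balance); objective: alternative algorithm.

-- chunk.strip() on a chunk held as a list of chars (both Pythons call .strip() on each yielded chunk)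
def pvStrip (cur : List Char) : String := String.ofList (PySem.Chars.strip cur)

-- ===== PORT A =====
-- the while loop of A: pos/startpos indices, in_quotes flag, acc = chunks yielded so far
-- (s[pos] is always in range here, so pyGetD is exact; s[startpos:pos] / s[startpos:] are PySem slices)
def aLoop (cs : List Char) (n : Nat) (fuel : Nat) (pos startpos : Nat) (inq : Bool)
    (acc : List String) : List String :=
  match fuel with
  | 0 =>
    -- fuel ≥ n - pos always holds, so fuel 0 means pos ≥ n: the loop has ended
    acc ++ [pvStrip (PySem.List.slice cs (some (startpos : Int)) none)]
  | fuel + 1 =>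
  if pos < n then
    if inq = false then
      if PySem.List.pyGetD cs (pos : Int) ' ' = ',' then
        -- end of chunk: yield s[startpos:pos].strip()
        aLoop cs n fuel (pos + 1) (pos + 1) inq
          (acc ++ [pvStrip (PySem.List.slice cs (some (startpos : Int)) (some (pos : Int)))])
      else if PySem.List.pyGetD cs (pos : Int) ' ' = '\'' then
        aLoop cs n fuel (pos + 1) startpos true acc
      else
        aLoop cs n fuel (pos + 1) startpos inq acc
    else
      if pos < n - 1 ∧ PySem.List.pyGetD cs (pos : Int) ' ' = '\'' ∧
          PySem.List.pyGetD cs ((pos + 1 : Nat) : Int) ' ' = '\'' then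
        aLoop cs n fuel (pos + 2) startpos inq acc
      else if PySem.List.pyGetD cs (pos : Int) ' ' = '\'' then
        aLoop cs n fuel (pos + 1) startpos false acc
      else
        aLoop cs n fuel (pos + 1) startpos inq acc
  else
    acc ++ [pvStrip (PySem.List.slice cs (some (startpos : Int)) none)]

def gen_items_from_sql_csv (s : String) : List String :=
  if s.toList = [] then []    -- `if not s: return`
  else aLoop s.toList s.toList.length s.toList.length 0 0 false []

-- ===== PORT B =====
-- the for loop of B over s.split(','): pending = the chunk still open (None = no pending chunk)
def bLoop (pieces : List (List Char)) (pending : Option (List Char)) (acc : List String) :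
    List String :=
  match pieces with
  | [] =>
    match pending with     -- `if pending is not None: yield pending.strip()`
    | none => acc
    | some p => acc ++ [pvStrip p]
  | piece :: rest =>
    let p := match pending with
             | none => piece
             | some q => q ++ [','] ++ piece   -- pending + SQLSEP + piece
    if PySem.Chars.count p ['\''] % 2 = 0 then bLoop rest none (acc ++ [pvStrip p])
    else bLoop rest (some p) acc

def gen_items_from_sql_csv_alt (s : String) : List String :=
  if s.toList = [] then []    -- `if not s: return`
  else bLoop (PySem.Chars.splitOn s.toList [',']) none []

-- ===== PRECONDITION & SPEC =====
def Spec_gen_items_from_sql_csv (s : String) (out : List String) : Prop := out = gen_items_from_sql_csv_alt s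
instance (s : String) (out : List String) : Decidable (Spec_gen_items_from_sql_csv s out) := by unfold Spec_gen_items_from_sql_csv; infer_instance

-- ===== CLAIM (what is proved, stated in full; the proofs are below) =====
def Claim_equal_gen_items_from_sql_csv : Prop := ∀ (s : String), Dom_gen_items_from_sql_csv s → Spec_gen_items_from_sql_csv s (gen_items_from_sql_csv s)

-- ===== LEMMAS AND PROOFS =====

-- reference machine: one char at a time; the in-quotes flag of A is exactly
-- "the current chunk holds an odd number of quote characters"
def refLoop : List Char → List Char → List String → List String
  | [], cur, acc => acc ++ [pvStrip cur]
  | c :: r, cur, acc =>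
    if c = ',' ∧ cur.count '\'' % 2 = 0 then refLoop r [] (acc ++ [pvStrip cur])
    else refLoop r (cur ++ [c]) acc

-- clean structural form of splitting on ','
def pvSplit : List Char → List (List Char)
  | [] => [[]]
  | c :: r => if c = ',' then [] :: pvSplit r else (pvSplit r).modifyHead (c :: ·)

-- refLoop grouped by comma-free pieces
def ref2 : List (List Char) → List Char → List String → List String
  | [], cur, acc => acc ++ [pvStrip cur]
  | [p], cur, acc => acc ++ [pvStrip (cur ++ p)]
  | p :: p' :: ps, cur, acc =>
    if (cur ++ p).count '\'' % 2 = 0 then ref2 (p' :: ps) [] (acc ++ [pvStrip (cur ++ p)])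
    else ref2 (p' :: ps) ((cur ++ p) ++ [',']) acc

lemma pvSplit_ne_nil (l : List Char) : pvSplit l ≠ [] := by
  cases l with
  | nil => simp [pvSplit]
  | cons c r =>
    simp only [pvSplit]
    split
    · simp
    · cases h : pvSplit r with
      | nil => exact absurd h (pvSplit_ne_nil r)
      | cons p ps => simp [List.modifyHead]

lemma count_go_singleton (c : Char) :
    ∀ (l : List Char) (fuel acc : Nat), l.length ≤ fuel →
      PySem.Chars.count.go [c] fuel l acc = acc + l.count c := by
  intro l
  induction l with
  | nil => intro fuel acc _; cases fuel <;> simp [PySem.Chars.count.go]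
  | cons h t ih =>
    intro fuel acc hf
    cases fuel with
    | zero => simp at hf
    | succ f =>
      simp only [PySem.Chars.count.go]
      by_cases hc : h = c
      · subst hc
        simp only [List.isPrefixOf, BEq.rfl, Bool.true_and, if_true,
          List.length_singleton, List.drop_one, List.tail_cons]
        rw [ih f (acc + 1) (by simpa using hf)]
        simp
        omega
      · have hp : ([c].isPrefixOf (h :: t)) = false := by
          simp [List.isPrefixOf]
          exact fun hch => absurd hch.symm hc
        rw [hp]
        simp only [if_false, Bool.false_eq_true]
        rw [ih f acc (by simpa using hf)]
        simp [hc]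

lemma count_singleton (q : List Char) (c : Char) : PySem.Chars.count q [c] = q.count c := by
  simp only [PySem.Chars.count, List.isEmpty_cons, if_false, Bool.false_eq_true]
  have := count_go_singleton c q q.length 0 le_rfl
  simpa using this

lemma splitOn_go_comma :
    ∀ (l : List Char) (fuel : Nat) (cur : List Char) (acc : List (List Char)),
      l.length ≤ fuel →
      PySem.Chars.splitOn.go [','] fuel l cur acc =
        acc.reverse ++ (pvSplit l).modifyHead (cur.reverse ++ ·) := by
  intro l
  induction l with
  | nil =>
    intro fuel cur acc _
    cases fuel <;> simp [PySem.Chars.splitOn.go, pvSplit, List.modifyHead]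
  | cons c t ih =>
    intro fuel cur acc hf
    cases fuel with
    | zero => simp at hf
    | succ f =>
      by_cases hc : c = ','
      · subst hc
        simp only [PySem.Chars.splitOn.go, List.isPrefixOf, BEq.rfl, Bool.true_and,
          if_true, List.length_singleton, List.drop_one, List.tail_cons]
        rw [ih f [] (cur.reverse :: acc) (by simpa using hf)]
        simp only [pvSplit, if_true, List.reverse_cons, List.reverse_nil, List.nil_append,
          List.modifyHead]
        cases h : pvSplit t with
        | nil => exact absurd h (pvSplit_ne_nil t)
        | cons p ps => simp
      · have hp : ([','].isPrefixOf (c :: t)) = false := by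
          simp [List.isPrefixOf]
          exact fun hch => absurd hch.symm hc
        simp only [PySem.Chars.splitOn.go, hp, if_false, Bool.false_eq_true]
        rw [ih f (c :: cur) acc (by simpa using hf)]
        simp only [pvSplit, hc, if_false]
        cases h : pvSplit t with
        | nil => simp [List.modifyHead]
        | cons p ps => simp [List.modifyHead]

lemma splitOn_comma (cs : List Char) : PySem.Chars.splitOn cs [','] = pvSplit cs := by
  simp only [PySem.Chars.splitOn]
  rw [splitOn_go_comma cs (cs.length + 1) [] [] (by omega)]
  cases h : pvSplit cs with
  | nil => exact absurd h (pvSplit_ne_nil cs)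
  | cons p ps => simp [List.modifyHead]

lemma take_drop_snoc (cs : List Char) (startpos pos : Nat) (hsp : startpos ≤ pos)
    (h : pos < cs.length) :
    (cs.drop startpos).take (pos + 1 - startpos) =
      (cs.drop startpos).take (pos - startpos) ++ [cs[pos]] := by
  have h1 : pos + 1 - startpos = (pos - startpos) + 1 := by omega
  rw [h1, List.take_add_one]
  congr 1
  have h2 : (cs.drop startpos)[pos - startpos]? = some cs[pos] := by
    rw [List.getElem?_drop]
    have : startpos + (pos - startpos) = pos := by omega
    rw [this]
    exact List.getElem?_eq_getElem h
  simp [h2]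

lemma aLoop_eq_refLoop (cs : List Char) :
    ∀ (fuel pos startpos : Nat) (inq : Bool) (acc : List String),
      cs.length - pos ≤ fuel → startpos ≤ pos → pos ≤ cs.length →
      (inq = true ↔ ((cs.drop startpos).take (pos - startpos)).count '\'' % 2 = 1) →
      aLoop cs cs.length fuel pos startpos inq acc =
        refLoop (cs.drop pos) ((cs.drop startpos).take (pos - startpos)) acc := by
  intro fuel
  induction fuel using Nat.strong_induction_on with
  | _ fuel ih =>
  intro pos startpos inq acc hfuel hsp hpn hinq
  cases fuel with
  | zero =>
    have hpe : pos = cs.length := by omega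
    subst hpe
    simp only [aLoop]
    rw [PySem.List.slice_from cs (by positivity)]
    have hcur : (cs.drop startpos).take (cs.length - startpos) = cs.drop startpos :=
      List.take_of_length_le (by simp)
    rw [List.drop_length, hcur]
    simp [refLoop]
  | succ f =>
  simp only [aLoop]
  by_cases hlt : pos < cs.length
  · rw [if_pos hlt]
    have hget : PySem.List.pyGetD cs ((pos : Nat) : Int) ' ' = cs[pos] := by
      rw [PySem.List.pyGetD_natCast, List.getD_eq_getElem cs ' ' hlt]
    have hdrop : cs.drop pos = cs[pos] :: cs.drop (pos + 1) := List.drop_eq_getElem_cons hlt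
    have hsnoc1 := take_drop_snoc cs startpos pos hsp hlt
    cases hinqv : inq with
    | false =>
      have heven : ((cs.drop startpos).take (pos - startpos)).count '\'' % 2 = 0 := by
        subst hinqv
        have h1 : ¬ ((cs.drop startpos).take (pos - startpos)).count '\'' % 2 = 1 :=
          fun hP => absurd (hinq.mpr hP) (by simp)
        omega
      rw [if_pos rfl]
      by_cases hc : cs[pos] = ','
      · rw [hget, if_pos hc]
        have hslice : PySem.List.slice cs (some (startpos : Int)) (some (pos : Int)) =
            (cs.drop startpos).take (pos - startpos) := by
          rw [PySem.List.slice_toNat cs (by positivity) (by positivity)]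
          simp
        rw [hslice]
        rw [ih f (by omega) (pos + 1) (pos + 1) false _ (by omega) le_rfl
          (by omega) (by simp)]
        rw [hdrop]
        simp only [refLoop]
        rw [if_pos ⟨hc, heven⟩]
        simp
      · rw [hget, if_neg hc]
        by_cases hq : cs[pos] = '\''
        · rw [if_pos hq]
          rw [ih f (by omega) (pos + 1) startpos true acc (by omega)
            (by omega) (by omega) ?_]
          · rw [hdrop]
            simp only [refLoop]
            rw [if_neg (by simp [hc]), hsnoc1]
          · rw [hsnoc1, List.count_append]
            simp [hq]
            omega
        · rw [if_neg hq]
          rw [ih f (by omega) (pos + 1) startpos false acc (by omega)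
            (by omega) (by omega) ?_]
          · rw [hdrop]
            simp only [refLoop]
            rw [if_neg (by simp [hc]), hsnoc1]
          · rw [hsnoc1, List.count_append]
            simp [hq]
            omega
    | true =>
      have hodd : ((cs.drop startpos).take (pos - startpos)).count '\'' % 2 = 1 := by
        subst hinqv; exact hinq.mp rfl
      rw [if_neg (by simp)]
      by_cases hlt2 : pos + 1 < cs.length
      · have hget2 : PySem.List.pyGetD cs ((pos + 1 : Nat) : Int) ' ' = cs[pos + 1] := by
          rw [PySem.List.pyGetD_natCast, List.getD_eq_getElem cs ' ' hlt2]
        have hdrop2 : cs.drop (pos + 1) = cs[pos + 1] :: cs.drop (pos + 2) :=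
          List.drop_eq_getElem_cons hlt2
        by_cases hqq : cs[pos] = '\'' ∧ cs[pos + 1] = '\''
        · rw [if_pos ⟨by omega, by rw [hget]; exact hqq.1, by rw [hget2]; exact hqq.2⟩]
          have e2 : pos + 2 = (pos + 1) + 1 := by omega
          have hsnoc2 := take_drop_snoc cs startpos (pos + 1) (by omega) hlt2
          rw [ih f (by omega) (pos + 2) startpos true acc (by omega)
            (by omega) (by omega) ?_]
          · rw [hdrop, hdrop2]
            simp only [refLoop]
            rw [if_neg (by simp [hqq.1]), if_neg (by simp [hqq.2]), e2, hsnoc2, hsnoc1]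
          · rw [e2, hsnoc2, hsnoc1, List.count_append, List.count_append]
            simp [hqq.1, hqq.2]
            omega
        · rw [if_neg (fun h => hqq ⟨by rw [hget] at h; exact h.2.1, by rw [hget2] at h; exact h.2.2⟩)]
          rw [hget]
          by_cases hq : cs[pos] = '\''
          · rw [if_pos hq]
            rw [ih f (by omega) (pos + 1) startpos false acc (by omega)
              (by omega) (by omega) ?_]
            · rw [hdrop]
              simp only [refLoop]
              rw [if_neg (by simp [hq]), hsnoc1]
            · rw [hsnoc1, List.count_append]
              simp [hq]
              omega
          · rw [if_neg hq]
            rw [ih f (by omega) (pos + 1) startpos true acc (by omega)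
              (by omega) (by omega) ?_]
            · rw [hdrop]
              simp only [refLoop]
              rw [if_neg (fun h => by have := h.2; omega), hsnoc1]
            · rw [hsnoc1, List.count_append]
              simp [hq]
              omega
      · rw [if_neg (fun h => absurd h.1 (by omega))]
        rw [hget]
        by_cases hq : cs[pos] = '\''
        · rw [if_pos hq]
          rw [ih f (by omega) (pos + 1) startpos false acc (by omega)
            (by omega) (by omega) ?_]
          · rw [hdrop]
            simp only [refLoop]
            rw [if_neg (by simp [hq]), hsnoc1]
          · rw [hsnoc1, List.count_append]
            simp [hq]
            omega
        · rw [if_neg hq]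
          rw [ih f (by omega) (pos + 1) startpos true acc (by omega)
            (by omega) (by omega) ?_]
          · rw [hdrop]
            simp only [refLoop]
            rw [if_neg (fun h => by have := h.2; omega), hsnoc1]
          · rw [hsnoc1, List.count_append]
            simp [hq]
            omega
  · rw [if_neg hlt]
    have hpe : pos = cs.length := by omega
    subst hpe
    rw [PySem.List.slice_from cs (by positivity)]
    have hcur : (cs.drop startpos).take (cs.length - startpos) = cs.drop startpos :=
      List.take_of_length_le (by simp)
    rw [List.drop_length, hcur]
    simp [refLoop]

lemma ref2_shift (ps : List (List Char)) (p : List Char) (c : Char) (cur : List Char)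
    (acc : List String) : ref2 ((c :: p) :: ps) cur acc = ref2 (p :: ps) (cur ++ [c]) acc := by
  cases ps with
  | nil => simp [ref2]
  | cons p' ps' => simp [ref2, List.append_assoc]

lemma refLoop_eq_ref2 :
    ∀ (rest cur : List Char) (acc : List String),
      refLoop rest cur acc = ref2 (pvSplit rest) cur acc := by
  intro rest
  induction rest with
  | nil => intro cur acc; simp [refLoop, pvSplit, ref2]
  | cons c r ih =>
    intro cur acc
    by_cases hc : c = ','
    · subst hc
      simp only [pvSplit, if_true]
      cases h : pvSplit r with
      | nil => exact absurd h (pvSplit_ne_nil r)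
      | cons p ps =>
        by_cases he : cur.count '\'' % 2 = 0
        · rw [refLoop.eq_def]
          simp only [he, and_true, if_true]
          rw [ih [] (acc ++ [pvStrip cur]), h]
          simp [ref2, he]
        · rw [refLoop.eq_def]
          simp only [he, and_false, if_false]
          rw [ih (cur ++ [',']) acc, h]
          simp [ref2, he]
    · rw [refLoop.eq_def]
      simp only [hc, false_and, if_false]
      rw [ih (cur ++ [c]) acc]
      have hsplit : pvSplit (c :: r) = (pvSplit r).modifyHead (c :: ·) := by
        simp [pvSplit, hc]
      rw [hsplit]
      cases h : pvSplit r with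
      | nil => exact absurd h (pvSplit_ne_nil r)
      | cons p ps => simp only [List.modifyHead]; rw [ref2_shift]

-- pendCur: bLoop's pending as ref2's current chunk (the re-joining comma is explicit in ref2)
def pendCur : Option (List Char) → List Char
  | none => []
  | some q => q ++ [',']

lemma ref2_eq_bLoop :
    ∀ (pieces : List (List Char)), pieces ≠ [] →
      ∀ (pending : Option (List Char)) (acc : List String),
        ref2 pieces (pendCur pending) acc = bLoop pieces pending acc := by
  intro pieces
  induction pieces with
  | nil => intro h; exact absurd rfl h
  | cons p ps ih =>
    intro _ pending acc
    cases ps with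
    | nil =>
      cases pending with
      | none =>
        have hb : bLoop [p] none acc =
            if PySem.Chars.count p ['\''] % 2 = 0 then acc ++ [pvStrip p]
            else acc ++ [pvStrip p] := rfl
        rw [hb]
        simp [ref2, count_singleton, pendCur]
      | some q =>
        have hb : bLoop [p] (some q) acc =
            if PySem.Chars.count (q ++ [','] ++ p) ['\''] % 2 = 0 then
              acc ++ [pvStrip (q ++ [','] ++ p)]
            else acc ++ [pvStrip (q ++ [','] ++ p)] := rfl
        rw [hb]
        simp [ref2, count_singleton, pendCur, List.append_assoc]
    | cons p' ps' =>
      have hne : p' :: ps' ≠ [] := by simp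
      cases pending with
      | none =>
        have hb : bLoop (p :: p' :: ps') none acc =
            if PySem.Chars.count p ['\''] % 2 = 0 then bLoop (p' :: ps') none (acc ++ [pvStrip p])
            else bLoop (p' :: ps') (some p) acc := rfl
        rw [hb]
        simp only [count_singleton, ref2, pendCur, List.nil_append]
        split_ifs with h
        · rw [← ih hne none]
          simp [pendCur]
        · rw [← ih hne (some p)]
          simp [pendCur]
      | some q =>
        have hb : bLoop (p :: p' :: ps') (some q) acc =
            if PySem.Chars.count (q ++ [','] ++ p) ['\''] % 2 = 0 then
              bLoop (p' :: ps') none (acc ++ [pvStrip (q ++ [','] ++ p)])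
            else bLoop (p' :: ps') (some (q ++ [','] ++ p)) acc := rfl
        rw [hb]
        simp only [count_singleton, ref2, pendCur, List.append_assoc]
        split_ifs with h
        · rw [← ih hne none]
          simp [pendCur]
        · have h2 := ih hne (some (q ++ [','] ++ p)) acc
          simp only [pendCur, List.append_assoc] at h2
          exact h2

-- ===== VERDICT (by name: the statement is the Claim_ definition above) =====
theorem gen_items_from_sql_csv_spec : Claim_equal_gen_items_from_sql_csv := by
  intro s _
  unfold Spec_gen_items_from_sql_csv gen_items_from_sql_csv gen_items_from_sql_csv_alt
  by_cases h : s.toList = []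
  · rw [if_pos h, if_pos h]
  · rw [if_neg h, if_neg h]
    rw [aLoop_eq_refLoop s.toList s.toList.length 0 0 false [] le_rfl le_rfl (Nat.zero_le _)
      (by simp)]
    rw [splitOn_comma]
    simp only [List.drop_zero, Nat.sub_zero, List.take_zero]
    rw [refLoop_eq_ref2]
    have hb := ref2_eq_bLoop (pvSplit s.toList) (pvSplit_ne_nil s.toList) none []
    simpa [pendCur] using hb
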